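-- pv_equiv track=rewrite | github.com/AlexeiMoroz/Python | lesson5/task_6.py | count_sum_from_list
-- ===== SOURCE A (Python) =====
-- def count_sum_from_list(list_with_nums):
--     total = 0
--     num = ''
--     for list_mem in list_with_nums:
--         for char in list_mem:
--             if char.isdigit():
--                 num = num + char
--             else:
--                 if num != '':
--                     total += (int(num))
--                     num = ''
--     return total
-- ===== SOURCE B (Python) =====
-- import re
--
-- def count_sum_from_list(list_with_nums):
--     return sum(int(run) for run in re.findall(r'\d+', ''.join(list_with_nums)))
-- ===== Notes on version B (the rewrite author's own statement) =====
-- stated objective: idiomatic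
-- what changed: B replaces the hand-rolled character state machine by the standard-library idiom: join the strings, extract every maximal digit run with re.findall(r'\d+'), and sum their int values; it also counts a trailing digit run, which A drops (see differs).
-- intended difference: On inputs whose concatenation ends in a digit, A silently discards the final pending digit run (its flush only happens on a following non-digit), returning the sum without that last number, while B includes it (e.g. ['ab12cd34','5']: A=12, B=357); including every number is the intended behaviour of a run-summing function. — e.g. on count_sum_from_list(["ab12cd34", "5"]): A returns 12, B returns 357
import Mathlib
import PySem

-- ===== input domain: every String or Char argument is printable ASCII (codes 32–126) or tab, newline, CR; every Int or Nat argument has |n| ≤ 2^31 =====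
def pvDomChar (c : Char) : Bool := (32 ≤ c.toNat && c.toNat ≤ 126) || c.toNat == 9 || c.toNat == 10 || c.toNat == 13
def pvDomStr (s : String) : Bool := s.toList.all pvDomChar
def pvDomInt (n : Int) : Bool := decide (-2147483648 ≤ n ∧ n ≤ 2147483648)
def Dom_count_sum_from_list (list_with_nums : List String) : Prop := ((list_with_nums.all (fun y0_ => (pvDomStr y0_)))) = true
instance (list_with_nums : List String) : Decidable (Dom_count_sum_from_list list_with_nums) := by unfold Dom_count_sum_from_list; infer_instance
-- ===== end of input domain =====

-- B replaces A's inline character state machine by join + regex digit-run extraction + sum (idiomatic);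
-- it intentionally also counts a digit run at the very end of the concatenation, which A drops (see D_ below).

-- int(num): in both programs always applied to nonempty all-digit strings, where Python's int()
-- returns normally, so the .getD 0 default is unreachable.
def pvIntVal (cs : List Char) : Int := (PySem.Int.ofChars? cs).getD 0

-- ===== PORT A =====
-- one step of A's inner 'for char in list_mem' (state = (total, num))
def pvStepA (st : Int × List Char) (c : Char) : Int × List Char :=
  if PySem.Chars.isdigit c then (st.1, st.2 ++ [c])
  else if st.2 ≠ [] then (st.1 + pvIntVal st.2, []) else st

def count_sum_from_list (list_with_nums : List String) : Int :=
  (list_with_nums.foldl (fun st list_mem => list_mem.toList.foldl pvStepA st) (0, [])).1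

-- ===== PORT B =====
-- re.findall(r'\d+', s): the list of maximal digit runs, hand-ported as a left-to-right scan
-- carrying the (reversed) current run; exact for this pattern on any input
def pvRunsAux : List Char → List Char → List (List Char)
  | pending, [] => if pending = [] then [] else [pending.reverse]
  | pending, c :: rest =>
    if PySem.Chars.isdigit c then pvRunsAux (c :: pending) rest
    else if pending = [] then pvRunsAux [] rest
    else pending.reverse :: pvRunsAux [] rest

def count_sum_from_list_alt (list_with_nums : List String) : Int :=
  ((pvRunsAux [] ((list_with_nums.map String.toList).flatten)).map pvIntVal).sum

-- ===== PRECONDITION & SPEC =====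
-- On inputs whose concatenation ends in a digit, A silently discards the final pending digit run
-- (its flush only happens on a following non-digit) and returns the sum without that last number,
-- while B includes it; including every number is the intended behaviour of a run-summing function.
def D_count_sum_from_list (list_with_nums : List String) : Prop :=
  ((String.join list_with_nums).toList.getLast?.any Char.isDigit) = true
instance (list_with_nums : List String) : Decidable (D_count_sum_from_list list_with_nums) := by
  unfold D_count_sum_from_list; infer_instance

def Spec_count_sum_from_list (list_with_nums : List String) (out : Int) : Prop :=
  ¬ D_count_sum_from_list list_with_nums → out = count_sum_from_list_alt list_with_nums
instance (list_with_nums : List String) (out : Int) : Decidable (Spec_count_sum_from_list list_with_nums out) := by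
  unfold Spec_count_sum_from_list; infer_instance

def pvDiffWitness_count_sum_from_list : List String := ["ab12cd34", "5"]
def pvDiffWitnessOut_count_sum_from_list : Int × Int := (12, 357)

-- ===== CLAIM (what is proved, stated in full; the proofs are below) =====
def Claim_unchanged_count_sum_from_list : Prop := ∀ (list_with_nums : List String), Dom_count_sum_from_list list_with_nums → Spec_count_sum_from_list list_with_nums (count_sum_from_list list_with_nums)
def Claim_changed_count_sum_from_list : Prop := Dom_count_sum_from_list (pvDiffWitness_count_sum_from_list) ∧ D_count_sum_from_list (pvDiffWitness_count_sum_from_list) ∧ count_sum_from_list (pvDiffWitness_count_sum_from_list) = pvDiffWitnessOut_count_sum_from_list.1 ∧ count_sum_from_list_alt (pvDiffWitness_count_sum_from_list) = pvDiffWitnessOut_count_sum_from_list.2 ∧ pvDiffWitnessOut_count_sum_from_list.1 ≠ pvDiffWitnessOut_count_sum_from_list.2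

-- ===== LEMMAS AND PROOFS =====

theorem pvIntVal_nil : pvIntVal [] = 0 := by decide

-- A's nested loops = one fold over the concatenation of all the strings
theorem foldA_flatten (xs : List String) (init : Int × List Char) :
    xs.foldl (fun st s => s.toList.foldl pvStepA st) init
      = ((xs.map String.toList).flatten).foldl pvStepA init := by
  induction xs generalizing init with
  | nil => rfl
  | cons s xs ih => simp [List.foldl_append, ih]

-- trailing digit run of the concatenation (what A's pending 'num' holds at the end)
def pvTrail (cs : List Char) : List Char := (cs.reverse.takeWhile PySem.Chars.isdigit).reverse

theorem pvTrail_all_digits (num : List Char) (h : ∀ c ∈ num, PySem.Chars.isdigit c = true) :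
    pvTrail num = num := by
  unfold pvTrail
  rw [List.takeWhile_eq_self_iff.mpr (fun x hx => h x (by simpa using hx)), List.reverse_reverse]

theorem pvTrail_break (num : List Char) (c : Char) (cs : List Char)
    (hc : PySem.Chars.isdigit c = false) :
    pvTrail (num ++ c :: cs) = pvTrail cs := by
  unfold pvTrail
  rw [List.reverse_append, List.reverse_cons, List.append_assoc, List.takeWhile_append]
  split
  · next hlen =>
    have heq : cs.reverse.takeWhile PySem.Chars.isdigit = cs.reverse :=
      (List.takeWhile_prefix _).eq_of_length hlen
    simp [hc, heq]
  · rfl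

-- the loop invariant: running A's step over cs from state (total, num) yields
-- (total + sum of all completed runs of num++cs, the trailing digit run of num++cs),
-- where B's scanner pvRunsAux num.reverse cs lists ALL runs of num++cs
theorem foldA_invariant (cs : List Char) : ∀ (total : Int) (num : List Char),
    (∀ c ∈ num, PySem.Chars.isdigit c = true) →
    (cs.foldl pvStepA (total, num)).1 + pvIntVal (cs.foldl pvStepA (total, num)).2
        = total + ((pvRunsAux num.reverse cs).map pvIntVal).sum
    ∧ (cs.foldl pvStepA (total, num)).2 = pvTrail (num ++ cs) := by
  induction cs with
  | nil =>
    intro total num h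
    simp only [List.foldl_nil, List.append_nil, pvRunsAux]
    rw [pvTrail_all_digits num h]
    by_cases hne : num = []
    · subst hne; simp [pvIntVal_nil]
    · rw [if_neg (by simpa using hne)]
      simp
  | cons c cs ih =>
    intro total num h
    simp only [List.foldl_cons]
    by_cases hc : PySem.Chars.isdigit c = true
    · rw [show pvStepA (total, num) c = (total, num ++ [c]) by simp [pvStepA, hc]]
      have hall : ∀ x ∈ num ++ [c], PySem.Chars.isdigit x = true := by
        intro x hx
        rcases List.mem_append.mp hx with h1 | h1
        · exact h x h1
        · simp at h1; simp [h1, hc]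
      have := ih total (num ++ [c]) hall
      simp only [pvRunsAux, hc, if_pos]
      rw [show c :: num.reverse = (num ++ [c]).reverse by simp]
      simpa [List.append_assoc] using this
    · rw [Bool.not_eq_true] at hc
      by_cases hne : num = []
      · subst hne
        rw [show pvStepA (total, []) c = (total, []) by simp [pvStepA, hc]]
        have := ih total [] (by simp)
        simp only [List.nil_append] at this ⊢
        have hb : pvTrail (c :: cs) = pvTrail cs := pvTrail_break [] c cs hc
        rw [hb]
        simp only [pvRunsAux, hc, List.reverse_nil]
        simpa using this
      · rw [show pvStepA (total, num) c = (total + pvIntVal num, []) by simp [pvStepA, hc, hne]]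
        have := ih (total + pvIntVal num) [] (by simp)
        simp only [List.nil_append] at this
        rw [pvTrail_break num c cs hc]
        simp only [pvRunsAux, hc]
        constructor
        · rw [this.1]
          simp [hne]
          ring
        · exact this.2

theorem count_eq_sub (xs : List String) :
    count_sum_from_list xs
      = count_sum_from_list_alt xs - pvIntVal (pvTrail ((xs.map String.toList).flatten)) := by
  unfold count_sum_from_list count_sum_from_list_alt
  rw [foldA_flatten]
  obtain ⟨h1, h2⟩ := foldA_invariant ((xs.map String.toList).flatten) 0 [] (by simp)
  simp only [List.nil_append, List.reverse_nil] at h1 h2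
  rw [h2] at h1
  omega

-- the concatenation behind D_ is the same character list the ports scan
theorem pvJoin_toList_aux (xs : List String) : ∀ (a : String),
    (List.foldl (fun r s => r ++ s) a xs).toList = a.toList ++ (xs.map String.toList).flatten := by
  induction xs with
  | nil => intro a; simp
  | cons s xs ih => intro a; simp [ih, String.toList_append]

theorem pvJoin_toList (xs : List String) :
    (String.join xs).toList = (xs.map String.toList).flatten := by
  simp [pvJoin_toList_aux xs ""]

-- D_'s 'last character is a digit' is exactly 'the trailing digit run is nonempty'
theorem pvD_iff (l : List Char) :
    (l.getLast?.any Char.isDigit = true) ↔ l.reverse.takeWhile PySem.Chars.isdigit ≠ [] := by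
  rw [← List.head?_reverse]
  cases h : l.reverse with
  | nil => simp
  | cons c t =>
    simp [List.takeWhile_cons, PySem.Chars.isdigit, Char.isDigit, Char.le_def]

-- ===== VERDICT (by name: the statement is the Claim_ definition above) =====
theorem count_sum_from_list_spec : Claim_unchanged_count_sum_from_list := by
  intro xs _ hD
  rw [count_eq_sub]
  have ht : pvTrail ((xs.map String.toList).flatten) = [] := by
    unfold D_count_sum_from_list at hD
    rw [pvJoin_toList, pvD_iff] at hD
    unfold pvTrail
    simp_all
  rw [ht, pvIntVal_nil]
  ring

theorem count_sum_from_list_changed : Claim_changed_count_sum_from_list := by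
  unfold Claim_changed_count_sum_from_list; decide
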